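-- pv_equiv track=rewrite | github.com/mattupstate/adventofcode2018 | src/aoc2018/d5/a.py | react
-- ===== SOURCE A (Python) =====
-- def react(polymer):
--     reacted_polymer = []
--
--     for current_unit in polymer:
--         try:
--             prev_unit = reacted_polymer.pop()
--         except IndexError:
--             prev_unit = None
--
--         if prev_unit is None:
--             reacted_polymer.append(current_unit)
--         elif prev_unit.lower() != current_unit.lower() or prev_unit == current_unit:
--             reacted_polymer.append(prev_unit)
--             reacted_polymer.append(current_unit)
--
--     return reacted_polymer
-- ===== SOURCE B (Python) =====
-- def react(polymer):
--     units = list(polymer)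
--     changed = True
--     while changed:
--         changed = False
--         for i in range(len(units) - 1):
--             if units[i] != units[i + 1] and units[i].lower() == units[i + 1].lower():
--                 del units[i:i + 2]
--                 changed = True
--                 break
--     return units
-- ===== Notes on version B (the rewrite author's own statement) =====
-- stated objective: alternative
-- what changed: Replaces the single-pass pop/append stack with repeated scans that delete the first adjacent opposite-case pair until a fixpoint is reached; equality follows from leftmost-reduction reaching the same normal form.
import Mathlib
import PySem

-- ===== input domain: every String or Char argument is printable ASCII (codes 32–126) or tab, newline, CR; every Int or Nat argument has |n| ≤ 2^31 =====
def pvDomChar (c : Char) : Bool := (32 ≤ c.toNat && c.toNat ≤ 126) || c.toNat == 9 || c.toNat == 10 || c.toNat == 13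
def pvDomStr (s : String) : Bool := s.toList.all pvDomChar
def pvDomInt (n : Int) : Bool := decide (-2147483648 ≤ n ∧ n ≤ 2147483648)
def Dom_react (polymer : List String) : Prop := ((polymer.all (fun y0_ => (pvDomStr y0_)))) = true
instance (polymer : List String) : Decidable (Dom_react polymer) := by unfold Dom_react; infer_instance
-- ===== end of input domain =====

-- B replaces A's single-pass pop/append stack by repeated scans deleting the first adjacent
-- opposite-case pair until a fixpoint (same result; alternative algorithm, not faster).

-- ===== PORT A =====
-- the body of A's for-loop: pop the last unit (None if empty), then append / drop
def reactStep (reacted : List String) (current : String) : List String :=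
  match PySem.List.pop? reacted (-1) with
  | none => reacted ++ [current]
  | some (prev, rest) =>
    if (PySem.Str.lower prev != PySem.Str.lower current) || (prev == current) then
      rest ++ [prev, current]
    else
      rest

def react (polymer : List String) : List String :=
  polymer.foldl reactStep []

-- ===== PORT B =====
-- B's reaction test: units[i] != units[i+1] and units[i].lower() == units[i+1].lower()
def bReacts (u v : String) : Bool :=
  (u != v) && (PySem.Str.lower u == PySem.Str.lower v)

-- B's inner for-loop: delete the first adjacent reacting pair, none if a full pass finds nothing
def removeFirst : List String → Option (List String)
  | u :: v :: rest =>
    if bReacts u v then some rest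
    else (removeFirst (v :: rest)).map (u :: ·)
  | _ => none

theorem removeFirst_length_lt : ∀ {xs ys : List String},
    removeFirst xs = some ys → ys.length < xs.length := by
  intro xs
  induction xs with
  | nil => intro ys hys; simp [removeFirst] at hys
  | cons u t ih =>
    intro ys h
    match t, h with
    | [], h => simp [removeFirst] at h
    | v :: rest, h =>
      rw [removeFirst] at h
      split at h
      · cases h; simp
      · simp only [Option.map_eq_some_iff] at h
        obtain ⟨ys', h', rfl⟩ := h
        have := ih h'
        simpa using Nat.succ_lt_succ this

-- B's while-loop: repeat passes until a pass removes nothing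
def react_alt (units : List String) : List String :=
  match h : removeFirst units with
  | some us => react_alt us
  | none => units
termination_by units.length
decreasing_by exact removeFirst_length_lt h

-- ===== PRECONDITION & SPEC =====
def Spec_react (polymer : List String) (out : List String) : Prop := out = react_alt polymer
instance (polymer : List String) (out : List String) : Decidable (Spec_react polymer out) := by unfold Spec_react; infer_instance

-- ===== CLAIM (what is proved, stated in full; the proofs are below) =====
def Claim_equal_react : Prop := ∀ (polymer : List String), Dom_react polymer → Spec_react polymer (react polymer)

-- ===== LEMMAS AND PROOFS =====

-- A's stack with its top at the head (reversed), to reason about the fold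
def stepR (rs : List String) (cur : String) : List String :=
  match rs with
  | [] => [cur]
  | p :: t =>
    if (PySem.Str.lower p != PySem.Str.lower cur) || (p == cur) then cur :: p :: t
    else t

theorem cond_eq_not_bReacts (p c : String) :
    ((PySem.Str.lower p != PySem.Str.lower c) || (p == c)) = !(bReacts p c) := by
  unfold bReacts
  cases h1 : p == c <;> cases h2 : (PySem.Str.lower p == PySem.Str.lower c) <;> simp [bne, h1, h2]

theorem reactStep_eq_stepR (s : List String) (cur : String) :
    reactStep s cur = (stepR s.reverse cur).reverse := by
  rcases s.eq_nil_or_concat with rfl | ⟨t, p, rfl⟩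
  · simp [reactStep, stepR, PySem.List.pop?]
  · rw [List.concat_eq_append, reactStep, PySem.List.pop?_last]
    simp only [List.reverse_append, List.reverse_cons, List.reverse_nil, List.nil_append,
      List.singleton_append, stepR]
    split <;> simp

theorem foldl_reactStep_eq (xs rs : List String) :
    List.foldl reactStep rs xs = (List.foldl stepR rs.reverse xs).reverse := by
  induction xs generalizing rs with
  | nil => simp
  | cons x xs ih =>
    simp only [List.foldl_cons]
    rw [ih, reactStep_eq_stepR, List.reverse_reverse]

-- the fixpoint of B's passes: no adjacent reacting pair
def Irred (xs : List String) : Prop := List.IsChain (fun u v => bReacts u v = false) xs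

theorem foldl_stepR_irred (xs : List String) : ∀ rs : List String,
    Irred (rs.reverse ++ xs) → List.foldl stepR rs xs = xs.reverse ++ rs := by
  induction xs with
  | nil => intro rs _; simp
  | cons x xs ih =>
    intro rs h
    cases rs with
    | nil =>
      simp only [List.foldl_cons, stepR]
      rw [ih [x] (by simpa using h)]
      simp
    | cons p t =>
      have hpx : bReacts p x = false := by
        have h' : List.IsChain (fun u v => bReacts u v = false)
            ((t.reverse ++ [p]) ++ x :: xs) := by simpa [Irred] using h
        rcases List.isChain_append.mp h' with ⟨_, _, hlast⟩
        exact hlast p (by simp) x (by simp)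
      simp only [List.foldl_cons, stepR, cond_eq_not_bReacts, hpx]
      simp only [Bool.not_false, if_pos]
      rw [ih (x :: p :: t) (by simpa [List.append_assoc] using h)]
      simp

theorem react_of_irred (xs : List String) (h : Irred xs) : react xs = xs := by
  rw [react, foldl_reactStep_eq]
  simp only [List.reverse_nil]
  rw [foldl_stepR_irred xs [] (by simpa using h)]
  simp

theorem react_remove_pair (pre post : List String) (u v : String)
    (hpre : Irred (pre ++ [u])) (huv : bReacts u v = true) :
    react (pre ++ u :: v :: post) = react (pre ++ post) := by
  have hpre' : Irred pre := (List.isChain_append.mp hpre).1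
  have hfold : List.foldl stepR [] pre = pre.reverse := by
    rw [foldl_stepR_irred pre [] (by simpa using hpre')]; simp
  rw [react, react, foldl_reactStep_eq, foldl_reactStep_eq]
  simp only [List.reverse_nil, List.foldl_append, List.foldl_cons]
  rw [hfold]
  congr 1
  cases hrev : pre.reverse with
  | nil =>
    have : pre = [] := by simpa using congrArg List.reverse hrev
    subst this
    simp [stepR, cond_eq_not_bReacts, huv]
  | cons w t =>
    have hwu : bReacts w u = false := by
      rcases List.isChain_append.mp hpre with ⟨_, _, hlast⟩
      have hw : pre.getLast? = some w := by
        rw [← List.head?_reverse, hrev]; rfl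
      exact hlast w hw u (by simp)
    simp [stepR, cond_eq_not_bReacts, hwu, huv]

theorem removeFirst_eq_none_iff (xs : List String) :
    removeFirst xs = none ↔ Irred xs := by
  induction xs using removeFirst.induct with
  | case1 u v rest hb =>
    rw [removeFirst, if_pos hb]
    simp [Irred, List.isChain_cons_cons, hb]
  | case2 u v rest hb ih =>
    rw [removeFirst, if_neg hb]
    simp only [Option.map_eq_none_iff, ih, Irred, List.isChain_cons_cons]
    constructor
    · intro h; exact ⟨by simpa using hb, h⟩
    · exact fun h => h.2
  | case3 t hne =>
    match t, hne with
    | [], _ => simp [removeFirst, Irred]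
    | [u], _ => simp [removeFirst, Irred]
    | u :: v :: rest, hne => exact absurd rfl (fun h => hne u v rest h)

theorem removeFirst_eq_some (xs ys : List String) (h : removeFirst xs = some ys) :
    ∃ pre u v post, xs = pre ++ u :: v :: post ∧ ys = pre ++ post ∧
      bReacts u v = true ∧ Irred (pre ++ [u]) := by
  induction xs using removeFirst.induct generalizing ys with
  | case1 u v rest hb =>
    rw [removeFirst, if_pos hb] at h
    cases h
    exact ⟨[], u, v, rest, by simp, by simp, hb, by simp [Irred]⟩
  | case2 u v rest hb ih =>
    rw [removeFirst, if_neg hb] at h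
    simp only [Option.map_eq_some_iff] at h
    obtain ⟨ys', h', rfl⟩ := h
    obtain ⟨pre', a, b, post, hx, hy, hab, hirr⟩ := ih ys' h'
    refine ⟨u :: pre', a, b, post, by simp [hx], by simp [hy], hab, ?_⟩
    have hhead : (pre' ++ [a]).head? = some v := by
      have h1 : (pre' ++ [a]).head? = (pre' ++ a :: b :: post).head? := by
        cases pre' <;> simp
      rw [h1, ← hx]
      rfl
    rw [Irred, List.cons_append, List.isChain_cons]
    refine ⟨?_, hirr⟩
    intro y hy'
    rw [hhead] at hy'
    cases hy'
    simpa using hb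
  | case3 t hne =>
    match t, hne, h with
    | [], _, h => simp [removeFirst] at h
    | [u], _, h => simp [removeFirst] at h
    | u :: v :: rest, hne, _ => exact absurd rfl (fun h => hne u v rest h)

theorem react_eq_alt : ∀ (n : ℕ) (xs : List String), xs.length ≤ n → react xs = react_alt xs := by
  intro n
  induction n with
  | zero =>
    intro xs hlen
    have : xs = [] := by cases xs <;> simp_all
    subst this
    rw [react_alt]
    simp [react, removeFirst]
  | succ n ih =>
    intro xs hlen
    rw [react_alt]
    cases hrf : removeFirst xs with
    | none =>
      simp only
      exact react_of_irred xs ((removeFirst_eq_none_iff xs).mp hrf)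
    | some us =>
      simp only
      have hlt := removeFirst_length_lt hrf
      obtain ⟨pre, u, v, post, hx, hy, hab, hirr⟩ := removeFirst_eq_some xs us hrf
      rw [hx, react_remove_pair pre post u v hirr hab, ← hy]
      exact ih us (by omega)

-- ===== VERDICT (by name: the statement is the Claim_ definition above) =====
theorem react_spec : Claim_equal_react := by
  intro polymer _
  unfold Spec_react
  exact react_eq_alt polymer.length polymer le_rfl
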